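-- pv_equiv track=rewrite | github.com/ymoisan/xcube | xcube/server/config.py | get_url_prefix
-- ===== SOURCE A (Python) =====
-- from typing import Mapping, Any
--
-- def get_url_prefix(config: Mapping[str, Any]) -> str:
--     """
--     Get the sanitized URL prefix so, if given, it starts with
--     a leading slash and ends without one.
--
--     :param config: Server configuration.
--     :return: Sanitized URL prefix, may be an empty string.
--     """
--     url_prefix = (config.get('url_prefix') or '').strip()
--     while url_prefix.startswith('//'):
--         url_prefix = url_prefix[1:]
--     while url_prefix.endswith('/'):
--         url_prefix = url_prefix[:-1]
--     if url_prefix == '':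
--         return ''
--     elif url_prefix.startswith('/'):
--         return url_prefix
--     else:
--         return '/' + url_prefix
-- ===== SOURCE B (Python) =====
-- def get_url_prefix(config):
--     """Simpler: fully strip slashes from both ends once, then re-add one leading slash."""
--     core = (config.get('url_prefix') or '').strip().strip('/')
--     return '/' + core if core else ''
-- ===== Notes on version B (the rewrite author's own statement) =====
-- stated objective: simpler
-- what changed: Replaces the two while-loops (collapse leading '//' one char at a time, chop trailing '/' one at a time) and the startswith branch by a single two-sided strip('/') followed by re-adding one leading slash when non-empty.
import Mathlib
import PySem

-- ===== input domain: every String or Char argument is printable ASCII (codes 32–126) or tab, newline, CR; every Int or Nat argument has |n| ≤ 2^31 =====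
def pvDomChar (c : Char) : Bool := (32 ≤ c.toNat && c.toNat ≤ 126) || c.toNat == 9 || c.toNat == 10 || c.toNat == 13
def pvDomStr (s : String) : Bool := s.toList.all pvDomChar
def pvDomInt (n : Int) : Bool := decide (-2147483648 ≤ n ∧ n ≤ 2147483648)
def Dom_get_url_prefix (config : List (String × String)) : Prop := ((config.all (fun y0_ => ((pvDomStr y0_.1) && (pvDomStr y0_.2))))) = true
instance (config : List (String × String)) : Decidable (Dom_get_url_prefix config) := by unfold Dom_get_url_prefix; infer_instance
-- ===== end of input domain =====

-- B replaces A's two character-at-a-time while-loops and the startswith branch by one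
-- two-sided strip of '/' followed by re-adding a single leading slash; return values are equal.


-- ===== PORT A =====
-- while url_prefix.startswith('//'): url_prefix = url_prefix[1:]
def collapseA (l : List Char) : List Char :=
  if PySem.Chars.startswith l ['/', '/'] then collapseA (PySem.List.slice l (some 1) none) else l
termination_by l.length
decreasing_by
  rename_i h
  simp only [PySem.Chars.startswith, List.isPrefixOf_iff_prefix] at h
  rcases h with ⟨t, ht⟩
  subst ht
  simp [PySem.List.slice_from _ (a := (1:Int)) (by norm_num)]

-- while url_prefix.endswith('/'): url_prefix = url_prefix[:-1]
def rstripA (l : List Char) : List Char :=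
  if PySem.Chars.endswith l ['/'] then rstripA (PySem.List.slice l none (some (-1))) else l
termination_by l.length
decreasing_by
  rename_i h
  simp only [PySem.Chars.endswith, List.isSuffixOf_iff_suffix] at h
  rcases h with ⟨t, ht⟩
  subst ht
  simp [PySem.List.slice]

def get_url_prefix (config : List (String × String)) : String :=
  let url_prefix0 := (config.lookup "url_prefix").getD ""   -- config.get('url_prefix') or ''
  let s := (PySem.Str.strip url_prefix0).toList             -- .strip()
  let u := rstripA (collapseA s)
  if u = [] then ""
  else if PySem.Chars.startswith u ['/'] then String.ofList u
  else String.ofList ('/' :: u)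

-- ===== PORT B =====
def get_url_prefix_alt (config : List (String × String)) : String :=
  let core := PySem.Chars.stripChars
      ((PySem.Str.strip ((config.lookup "url_prefix").getD "")).toList) ['/']
  if core = [] then "" else String.ofList ('/' :: core)

-- ===== PRECONDITION & SPEC =====
def Spec_get_url_prefix (config : List (String × String)) (out : String) : Prop := out = get_url_prefix_alt config
instance (config : List (String × String)) (out : String) : Decidable (Spec_get_url_prefix config out) := by unfold Spec_get_url_prefix; infer_instance

-- ===== CLAIM (what is proved, stated in full; the proofs are below) =====
def Claim_equal_get_url_prefix : Prop := ∀ (config : List (String × String)), Dom_get_url_prefix config → Spec_get_url_prefix config (get_url_prefix config)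

-- ===== LEMMAS AND PROOFS =====

lemma collapseA_nil : collapseA [] = [] := by
  rw [collapseA]; simp [PySem.Chars.startswith, List.isPrefixOf]

lemma collapseA_of_head_ne (c : Char) (l : List Char) (h : c ≠ '/') :
    collapseA (c :: l) = c :: l := by
  rw [collapseA]
  have hs : PySem.Chars.startswith (c :: l) ['/', '/'] = false := by
    simp only [PySem.Chars.startswith, List.isPrefixOf]
    simp [Ne.symm h]
  simp [hs]

lemma collapseA_slash (l : List Char) :
    collapseA ('/' :: l) = '/' :: l.dropWhile (· == '/') := by
  induction l with
  | nil =>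
    rw [collapseA]
    simp [PySem.Chars.startswith, List.isPrefixOf]
  | cons c t ih =>
    by_cases hc : c = '/'
    · subst hc
      have hstep : collapseA ('/' :: '/' :: t) = collapseA ('/' :: t) := by
        rw [collapseA]
        have h1 : PySem.Chars.startswith ('/' :: '/' :: t) ['/', '/'] = true := by
          simp [PySem.Chars.startswith, List.isPrefixOf]
        rw [if_pos h1]
        congr 1
        have := PySem.List.slice_from (xs := '/' :: '/' :: t) (a := (1:Int)) (by norm_num)
        simpa using this
      rw [hstep, ih]
      simp
    · rw [collapseA]
      have hs : PySem.Chars.startswith ('/' :: c :: t) ['/', '/'] = false := by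
        simp only [PySem.Chars.startswith, List.isPrefixOf]
        simp [Ne.symm hc]
      rw [if_neg (by simp [hs])]
      simp [hc]

lemma rstripA_eq (l : List Char) :
    rstripA l = (l.reverse.dropWhile (· == '/')).reverse := by
  by_cases h : PySem.Chars.endswith l ['/'] = true
  · obtain ⟨t, ht⟩ : ∃ t, l = t ++ ['/'] := by
      simp only [PySem.Chars.endswith, List.isSuffixOf_iff_suffix] at h
      rcases h with ⟨t, ht⟩; exact ⟨t, ht.symm⟩
    subst ht
    rw [rstripA, if_pos h]
    have hslice : PySem.List.slice (t ++ ['/']) none (some (-1)) = t := by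
      simp [PySem.List.slice]
    rw [hslice, rstripA_eq t]
    simp
  · rw [rstripA, if_neg h]
    cases hr : l.reverse with
    | nil => simp [List.reverse_eq_nil_iff.mp hr]
    | cons a r =>
      have ha : a ≠ '/' := by
        intro hc; subst hc
        apply h
        simp only [PySem.Chars.endswith, List.isSuffixOf_iff_suffix]
        refine ⟨r.reverse, ?_⟩
        have := congrArg List.reverse hr
        simpa using this.symm
      rw [List.dropWhile_cons_of_neg (by simp [ha]), ← hr, List.reverse_reverse]
termination_by l.length
decreasing_by subst ht; simp

-- B's strip('/') predicate is (· == '/')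
lemma stripChars_eq (s : List Char) :
    PySem.Chars.stripChars s ['/']
      = (((s.dropWhile (· == '/')).reverse.dropWhile (· == '/'))).reverse := by
  have hp : (fun c => (['/'] : List Char).contains c) = (fun c => c == '/') := by
    funext c
    simp
    exact (beq_eq_decide c '/').symm
  simp only [PySem.Chars.stripChars, hp]

-- the core equality on the character list, for any input list s
lemma tail_eq (s : List Char) :
    (if rstripA (collapseA s) = [] then ""
     else if PySem.Chars.startswith (rstripA (collapseA s)) ['/'] then String.ofList (rstripA (collapseA s))
     else String.ofList ('/' :: rstripA (collapseA s)))
    = (if PySem.Chars.stripChars s ['/'] = [] then ""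
       else String.ofList ('/' :: PySem.Chars.stripChars s ['/'])) := by
  rw [stripChars_eq]
  cases s with
  | nil =>
    rw [collapseA_nil, rstripA_eq]
    simp only [List.reverse_nil, List.dropWhile_nil]
    rfl
  | cons c t =>
    by_cases hc : c = '/'
    · subst hc
      rw [collapseA_slash, rstripA_eq]
      have hdw : List.dropWhile (fun x => x == '/') ('/' :: t) = List.dropWhile (fun x => x == '/') t := by
        simp
      rw [hdw]
      have hhd := List.head?_dropWhile_not (fun x => x == '/') t
      generalize hg : List.dropWhile (fun x => x == '/') t = r at hhd ⊢
      cases r with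
      | nil => simp
      | cons a r' =>
        have ha : (a == '/') = false := by simpa using hhd
        have hne : List.dropWhile (fun x => x == '/') (a :: r').reverse ≠ [] := by
          intro h0
          have hall := List.dropWhile_eq_nil_iff.mp h0 a (by simp)
          simp [ha] at hall
        have happ : List.dropWhile (fun x => x == '/') (('/' :: a :: r').reverse)
            = List.dropWhile (fun x => x == '/') ((a :: r').reverse) ++ ['/'] := by
          have h1 : ('/' :: a :: r').reverse = (a :: r').reverse ++ ['/'] := by simp
          rw [h1, List.dropWhile_append]
          have hie : (List.dropWhile (fun x => x == '/') (a :: r').reverse).isEmpty = false := by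
            simpa using hne
          rw [hie]
          rfl
        have hrev : (List.dropWhile (fun x => x == '/') (a :: r').reverse ++ ['/']).reverse
            = '/' :: (List.dropWhile (fun x => x == '/') (a :: r').reverse).reverse := by
          simp
        rw [happ, hrev]
        have hcore : (List.dropWhile (fun x => x == '/') (a :: r').reverse).reverse ≠ [] := by
          simpa using hne
        rw [if_neg (by simp : ¬('/' :: (List.dropWhile (fun x => x == '/') (a :: r').reverse).reverse = ([] : List Char)))]
        rw [if_pos (by simp [PySem.Chars.startswith, List.isPrefixOf] :
              PySem.Chars.startswith ('/' :: (List.dropWhile (fun x => x == '/') (a :: r').reverse).reverse) ['/'] = true)]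
        rw [if_neg hcore]
    · rw [collapseA_of_head_ne c t hc, rstripA_eq,
         List.dropWhile_cons_of_neg (by simp [hc])]
      rcases hu : (List.dropWhile (fun x => x == '/') ((c :: t).reverse)).reverse with _ | ⟨b, u'⟩
      · simp
      · have hpre : b :: u' <+: (c :: t) := by
          rw [← hu]
          have hsuf : List.dropWhile (fun x => x == '/') (c :: t).reverse <:+ (c :: t).reverse :=
            List.dropWhile_suffix _
          have : (List.dropWhile (fun x => x == '/') (c :: t).reverse).reverse <+: ((c :: t).reverse).reverse := by
            rw [List.reverse_prefix]
            simpa using hsuf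
          simpa using this
        have hb : b = c := by
          rcases hpre with ⟨t2, ht2⟩
          have := congrArg List.head? ht2
          simpa using this
        have hsw : ¬ PySem.Chars.startswith (b :: u') ['/'] = true := by
          simp [PySem.Chars.startswith, List.isPrefixOf, hb, Ne.symm hc]
        simp [hsw]

-- ===== VERDICT (by name: the statement is the Claim_ definition above) =====
theorem get_url_prefix_spec : Claim_equal_get_url_prefix := by
  intro config _
  unfold Spec_get_url_prefix get_url_prefix get_url_prefix_alt
  exact tail_eq _
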